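-- pv_equiv track=rewrite | github.com/Andreivilla/Teoria_de_Grafos | verificaCiclo.py | verificaCiclo
-- ===== SOURCE A (Python) =====
-- def verificaCiclo(arcos):
--     if arcos[0] != arcos[len(arcos)-1]:
--         return False
--     for i in range(len(arcos)-1):
--         for j in range(i+1, len(arcos)-1, +1):
--             if(arcos[i] == arcos[j]):
--                 return False
--     return True
-- ===== SOURCE B (Python) =====
-- def verificaCiclo(arcos):
--     return arcos[0] == arcos[-1] and len(set(arcos[:-1])) == len(arcos) - 1
-- ===== Notes on version B (the rewrite author's own statement) =====
-- stated objective: simpler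
-- what changed: Replaces A's nested index-pair scan with a single boolean expression testing distinctness of arcos[:-1] by comparing the cardinality of its set with len(arcos)-1, after the same endpoint check.
import Mathlib
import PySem

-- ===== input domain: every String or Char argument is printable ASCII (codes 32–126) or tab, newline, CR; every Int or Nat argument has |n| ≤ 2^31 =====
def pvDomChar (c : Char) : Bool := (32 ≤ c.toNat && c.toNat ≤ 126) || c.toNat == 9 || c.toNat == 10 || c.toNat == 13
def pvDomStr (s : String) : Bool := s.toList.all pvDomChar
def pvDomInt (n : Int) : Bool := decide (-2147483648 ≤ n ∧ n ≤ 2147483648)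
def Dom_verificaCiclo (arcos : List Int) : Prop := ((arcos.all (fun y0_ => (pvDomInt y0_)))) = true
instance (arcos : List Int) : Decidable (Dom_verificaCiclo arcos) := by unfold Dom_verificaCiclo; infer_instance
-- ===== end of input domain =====

-- B replaces A's quadratic nested index scan by one set-cardinality test on arcos[:-1] (simpler, one pass).

-- ===== PORT A =====
-- inner loop 'for j in range(i+1, len(arcos)-1, +1)': False on the first equal pair
def vcInner (arcos : List Int) (i : Int) : List Int → Bool
  | [] => true
  | j :: js =>
    if PySem.List.pyGet? arcos i = PySem.List.pyGet? arcos j then false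
    else vcInner arcos i js

-- outer loop 'for i in range(len(arcos)-1)'
def vcOuter (arcos : List Int) : List Int → Bool
  | [] => true
  | i :: is_ =>
    if vcInner arcos i (PySem.List.pyRange (i + 1) ((arcos.length : Int) - 1) 1) then
      vcOuter arcos is_
    else false

def verificaCiclo (arcos : List Int) : Bool :=
  match PySem.List.pyGet? arcos 0, PySem.List.pyGet? arcos ((arcos.length : Int) - 1) with
  | some a, some b =>
    if a ≠ b then false
    else vcOuter arcos (PySem.List.pyRange 0 ((arcos.length : Int) - 1) 1)
  | _, _ => false   -- unreachable under Pre_ (Python raises IndexError on [])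

-- ===== PORT B =====
def verificaCiclo_alt (arcos : List Int) : Bool :=
  -- a none (Python IndexError on []) is unreachable under Pre_; .getD false is a dummy
  (((PySem.List.pyGet? arcos 0).bind fun a =>
    (PySem.List.pyGet? arcos (-1)).map fun b =>
      a == b &&
        ((PySem.Set.ofList (PySem.List.slice arcos none (some (-1)))).length == arcos.length - 1))).getD false

-- ===== PRECONDITION & SPEC =====
-- Pre_ excludes only the empty list, on which both A and B raise IndexError (arcos[0]).
def Pre_verificaCiclo (arcos : List Int) : Prop := arcos ≠ []
instance (arcos : List Int) : Decidable (Pre_verificaCiclo arcos) := by unfold Pre_verificaCiclo; infer_instance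
def pvWitness_verificaCiclo : List Int := [1, 2, 1]

def Spec_verificaCiclo (arcos : List Int) (out : Bool) : Prop := out = verificaCiclo_alt arcos
instance (arcos : List Int) (out : Bool) : Decidable (Spec_verificaCiclo arcos out) := by unfold Spec_verificaCiclo; infer_instance

-- ===== CLAIM (what is proved, stated in full; the proofs are below) =====
def Claim_equal_verificaCiclo : Prop := ∀ (arcos : List Int), Dom_verificaCiclo arcos → Pre_verificaCiclo arcos → Spec_verificaCiclo arcos (verificaCiclo arcos)

-- ===== LEMMAS AND PROOFS =====

lemma pyGet?_nat (xs : List Int) (i : Nat) (h : i < xs.length) :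
    PySem.List.pyGet? xs (i : Int) = some xs[i] := by
  simp [h]

lemma pyGet?_neg_one (xs : List Int) (h : xs ≠ []) :
    PySem.List.pyGet? xs (-1) = some (xs[xs.length - 1]'(by
      cases xs with
      | nil => exact absurd rfl h
      | cons a t => simp)) := by
  have h1 : 1 ≤ xs.length := by
    cases xs with
    | nil => exact absurd rfl h
    | cons a t => simp
  simp [PySem.List.pyGet?, PySem.List.pyIdx?, h1]

lemma vcInner_eq_true (arcos : List Int) (i : Int) (js : List Int) :
    vcInner arcos i js = true ↔
      ∀ j ∈ js, PySem.List.pyGet? arcos i ≠ PySem.List.pyGet? arcos j := by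
  induction js with
  | nil => simp [vcInner]
  | cons j js ih =>
    by_cases h : PySem.List.pyGet? arcos i = PySem.List.pyGet? arcos j
    · simp [vcInner, h]
    · simp [vcInner, h, ih]

lemma vcOuter_eq_true (arcos : List Int) (is_ : List Int) :
    vcOuter arcos is_ = true ↔
      ∀ i ∈ is_, vcInner arcos i
        (PySem.List.pyRange (i + 1) ((arcos.length : Int) - 1) 1) = true := by
  induction is_ with
  | nil => simp [vcOuter]
  | cons i is_ ih =>
    cases hb : vcInner arcos i (PySem.List.pyRange (i + 1) ((arcos.length : Int) - 1) 1) <;>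
      simp [vcOuter, hb, ih]

-- A's nested scan over indices 0..n-2 is exactly 'dropLast has no duplicates'
lemma vcOuter_iff_nodup (arcos : List Int) :
    vcOuter arcos (PySem.List.pyRange 0 ((arcos.length : Int) - 1) 1) = true ↔
      arcos.dropLast.Nodup := by
  rw [vcOuter_eq_true]
  constructor
  · intro H
    show arcos.dropLast.Pairwise (· ≠ ·)
    rw [List.pairwise_iff_getElem]
    intro i j hi hj hij
    have dl : arcos.dropLast.length = arcos.length - 1 := by simp
    rw [dl] at hi hj
    have hiI : (i : Int) ∈ PySem.List.pyRange 0 ((arcos.length : Int) - 1) 1 :=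
      (PySem.List.mem_pyRange_one ..).mpr ⟨by omega, by omega⟩
    have hjI : (j : Int) ∈ PySem.List.pyRange ((i : Int) + 1) ((arcos.length : Int) - 1) 1 :=
      (PySem.List.mem_pyRange_one ..).mpr ⟨by omega, by omega⟩
    have hne := (vcInner_eq_true ..).mp (H _ hiI) _ hjI
    rw [pyGet?_nat arcos i (by omega), pyGet?_nat arcos j (by omega)] at hne
    simp only [ne_eq, Option.some.injEq] at hne
    simpa [List.getElem_dropLast] using hne
  · intro H i hiI
    rw [vcInner_eq_true]
    intro j hjI
    obtain ⟨hi0, hi1⟩ := (PySem.List.mem_pyRange_one ..).mp hiI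
    obtain ⟨hj0, hj1⟩ := (PySem.List.mem_pyRange_one ..).mp hjI
    lift i to ℕ using hi0
    lift j to ℕ using (by omega : (0 : Int) ≤ j)
    rw [pyGet?_nat arcos i (by omega), pyGet?_nat arcos j (by omega)]
    simp only [ne_eq, Option.some.injEq]
    intro hEq
    have dl : arcos.dropLast.length = arcos.length - 1 := by simp
    have hnd := List.pairwise_iff_getElem.mp H i j (by omega) (by omega) (by omega)
    exact hnd (by simpa [List.getElem_dropLast] using hEq)

lemma ofList_length_eq_iff_nodup (l : List Int) :
    (PySem.Set.ofList l).length = l.length ↔ l.Nodup := by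
  have hts : (PySem.Set.ofList l).toFinset = l.toFinset := by
    ext x; simp [List.mem_toFinset, PySem.Set.mem_ofList]
  constructor
  · intro hlen
    have h1 : l.toFinset.card = l.length := by
      rw [← hts, List.toFinset_card_of_nodup (PySem.Set.nodup_ofList l), hlen]
    have h2 := List.card_toFinset (l := l)
    have h3 : l.dedup.length = l.length := by omega
    exact List.dedup_eq_self.mp ((List.dedup_sublist l).eq_of_length h3)
  · intro hnd
    calc (PySem.Set.ofList l).length
        = (PySem.Set.ofList l).toFinset.card :=
          (List.toFinset_card_of_nodup (PySem.Set.nodup_ofList l)).symm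
      _ = l.toFinset.card := by rw [hts]
      _ = l.length := List.toFinset_card_of_nodup hnd

lemma eq_main (arcos : List Int) (h : arcos ≠ []) :
    verificaCiclo arcos = verificaCiclo_alt arcos := by
  have hn : 0 < arcos.length := by
    cases arcos with
    | nil => exact absurd rfl h
    | cons a t => simp
  have h0 : PySem.List.pyGet? arcos 0 = some (arcos[0]'hn) := by
    simpa using pyGet?_nat arcos 0 hn
  have hlast : PySem.List.pyGet? arcos ((arcos.length : Int) - 1) =
      some (arcos[arcos.length - 1]'(by omega)) := by
    have hc : ((arcos.length : Int) - 1) = ((arcos.length - 1 : Nat) : Int) := by omega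
    rw [hc, pyGet?_nat arcos (arcos.length - 1) (by omega)]
  have hneg := pyGet?_neg_one arcos h
  simp only [verificaCiclo, verificaCiclo_alt, h0, hlast, hneg, Option.bind_some,
    Option.map_some, Option.getD_some]
  by_cases he : arcos[0]'hn = arcos[arcos.length - 1]'(by omega)
  · simp only [he, ne_eq, not_true_eq_false, if_false, beq_self_eq_true,
      Bool.true_and]
    rw [PySem.List.slice_to_neg_one]
    apply Bool.eq_iff_iff.mpr
    rw [vcOuter_iff_nodup, Nat.beq_eq_true_eq]
    have dl : arcos.dropLast.length = arcos.length - 1 := by simp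
    rw [← dl, ofList_length_eq_iff_nodup]
  · simp [he]

-- ===== VERDICT (by name: the statement is the Claim_ definition above) =====
theorem verificaCiclo_spec : Claim_equal_verificaCiclo := by
  intro arcos _ hpre
  unfold Spec_verificaCiclo
  exact eq_main arcos hpre
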